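-- pv_equiv track=rewrite | github.com/chenwei67/operatorScript | generate_report.py | parse_instance_device
-- ===== SOURCE A (Python) =====
-- def parse_instance_device(series_key):
--     instance = None
--     device = None
--     for part in series_key.split(" "):
--         if part.startswith("instance="):
--             instance = part[len("instance="):]
--         elif part.startswith("device="):
--             device = part[len("device="):]
--     return instance, device
-- ===== SOURCE B (Python) =====
-- def parse_instance_device(series_key):
--     table = {}
--     for part in series_key.split(" "):
--         i = part.find("=")
--         if i != -1:
--             table[part[:i]] = part[i + 1:]
--     return table.get("instance"), table.get("device")
-- ===== Notes on version B (the rewrite author's own statement) =====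
-- stated objective: idiomatic
-- what changed: B parses every space-separated part into a generic key=value table in one pass (split at the first equals sign, last occurrence wins) and then looks the two target keys up, instead of A's per-key startswith/slice branches inside the loop.
import Mathlib
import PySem

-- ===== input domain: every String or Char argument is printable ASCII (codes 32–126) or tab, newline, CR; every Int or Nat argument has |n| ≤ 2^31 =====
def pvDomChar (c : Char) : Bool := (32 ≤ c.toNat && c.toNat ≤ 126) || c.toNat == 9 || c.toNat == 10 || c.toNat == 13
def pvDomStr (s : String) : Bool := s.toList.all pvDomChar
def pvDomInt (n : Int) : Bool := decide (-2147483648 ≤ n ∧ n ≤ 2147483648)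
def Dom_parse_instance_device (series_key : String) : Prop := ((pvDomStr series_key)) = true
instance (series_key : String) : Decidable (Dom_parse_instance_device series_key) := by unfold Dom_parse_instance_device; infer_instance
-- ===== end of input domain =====

-- B replaces A's per-key startswith branches by one generic key=value table built in a single
-- pass (split each part at its first '=', last occurrence wins) followed by two lookups (idiomatic).

-- ===== PORT A =====
-- one iteration of A's loop body over the running (instance, device) state
def pid_astep (st : Option String × Option String) (part : String) : Option String × Option String :=
  if PySem.Str.startswith part "instance=" then
    (some (PySem.Str.slice part (some 9) none), st.2)   -- part[len("instance="):], len("instance=") = 9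
  else if PySem.Str.startswith part "device=" then
    (st.1, some (PySem.Str.slice part (some 7) none))   -- part[len("device="):], len("device=") = 7
  else st

def parse_instance_device (series_key : String) : Option String × Option String :=
  -- series_key.split(" "): split? is none only for sep = "", so getD [] is exact here
  ((PySem.Str.split? series_key " ").getD []).foldl pid_astep (none, none)

-- ===== PORT B =====
-- one iteration of B's loop body: i = part.find("="); if i != -1: table[part[:i]] = part[i+1:]
def pid_bstep (d : PySem.Dict String String) (part : String) : PySem.Dict String String :=
  let i := PySem.Str.find part "="
  if i != -1 then
    d.insert (PySem.Str.slice part none (some i)) (PySem.Str.slice part (some (i + 1)) none)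
  else d

def parse_instance_device_alt (series_key : String) : Option String × Option String :=
  let table := ((PySem.Str.split? series_key " ").getD []).foldl pid_bstep PySem.Dict.empty
  (table.get? "instance", table.get? "device")

-- ===== PRECONDITION & SPEC =====
def Spec_parse_instance_device (series_key : String) (out : Option String × Option String) : Prop := out = parse_instance_device_alt series_key
instance (series_key : String) (out : Option String × Option String) : Decidable (Spec_parse_instance_device series_key out) := by unfold Spec_parse_instance_device; infer_instance

-- ===== CLAIM (what is proved, stated in full; the proofs are below) =====
def Claim_equal_parse_instance_device : Prop := ∀ (series_key : String), Dom_parse_instance_device series_key → Spec_parse_instance_device series_key (parse_instance_device series_key)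

-- ===== LEMMAS AND PROOFS =====

-- B's step, observed through get? at a key containing no '=': it records exactly
-- the parts that start with "<k>=", with the text after that first '=' as the value.
lemma pid_bstep_get (d : PySem.Dict String String) (part k : String) (hk : '=' ∉ k.toList) :
    (pid_bstep d part).get? k =
      if PySem.Str.startswith part (k ++ "=") then
        some (String.ofList (part.toList.drop (k.toList.length + 1)))
      else d.get? k := by
  have heq : ("=" : String).toList = ['='] := by decide
  by_cases hf : PySem.Chars.find part.toList ['='] = -1
  · -- no '=' in part: B leaves the dict unchanged; the startswith test must be false too
    have hni : ¬ ['='] <:+: part.toList := (PySem.Chars.find_eq_neg_one_iff _ _).mp hf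
    have hsw : PySem.Str.startswith part (k ++ "=") = false := by
      rw [PySem.Str.startswith_eq]
      cases hb : PySem.Chars.startswith part.toList (k ++ "=").toList
      · rfl
      · have hp := (PySem.Chars.startswith_iff _ _).mp hb
        rw [String.toList_append, heq] at hp
        exact absurd (((List.suffix_append k.toList ['=']).isInfix).trans hp.isInfix) hni
    rw [hsw]
    simp only [pid_bstep, PySem.Str.find_eq, heq, hf]
    simp
  · have h0 : 0 ≤ PySem.Chars.find part.toList ['='] := by
      have := PySem.Chars.neg_one_le_find part.toList ['=']
      omega
    obtain ⟨hpre, hmin⟩ := PySem.Chars.find_spec h0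
    have hcond : (PySem.Chars.find part.toList ['='] != -1) = true := by simpa using hf
    simp only [pid_bstep, PySem.Str.find_eq, heq, hcond, if_true]
    generalize hi : PySem.Chars.find part.toList ['='] = i at *
    obtain ⟨n, rfl⟩ : ∃ n : ℕ, (n : Int) = i := ⟨i.toNat, Int.toNat_of_nonneg h0⟩
    rw [Int.toNat_natCast] at hpre hmin
    obtain ⟨t, ht⟩ := hpre
    have hsplit : part.toList = part.toList.take n ++ '=' :: t := by
      conv_lhs => rw [← List.take_append_drop n part.toList]
      rw [← ht]; rfl
    have hkey : (PySem.Str.slice part none (some (n : Int))).toList = part.toList.take n := by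
      rw [PySem.Str.toList_slice, PySem.Chars.slice_eq_listSlice,
        PySem.List.slice_to _ h0, Int.toNat_natCast]
    have hval : (PySem.Str.slice part (some ((n : Int) + 1)) none).toList = part.toList.drop (n + 1) := by
      rw [PySem.Str.toList_slice, PySem.Chars.slice_eq_listSlice,
        PySem.List.slice_from _ (by omega : (0:Int) ≤ (n : Int) + 1)]
      congr 1
    have hlen : n < part.toList.length := by
      by_contra h
      rw [List.drop_eq_nil_of_le (by omega)] at ht
      simp at ht
    by_cases hkk : k = PySem.Str.slice part none (some (n : Int))
    · -- k is exactly the recorded key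
      have hks : k.toList = part.toList.take n := by rw [hkk]; exact hkey
      have hklen : k.toList.length = n := by rw [hks, List.length_take]; omega
      have hsw : PySem.Str.startswith part (k ++ "=") = true := by
        rw [PySem.Str.startswith_eq, PySem.Chars.startswith_iff, String.toList_append, heq, hks]
        exact ⟨t, by rw [List.append_assoc]; exact hsplit.symm⟩
      rw [hkk, PySem.Dict.get?_insert_self, ← hkk, hsw, if_pos rfl]
      congr 1
      rw [← String.toList_inj, String.toList_ofList, hval, hklen]
    · -- a different key is recorded: the startswith test must be false
      rw [PySem.Dict.get?_insert_of_ne _ _ hkk]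
      have hsw : PySem.Str.startswith part (k ++ "=") = false := by
        cases hb : PySem.Str.startswith part (k ++ "=")
        · rfl
        · exfalso
          rw [PySem.Str.startswith_eq] at hb
          have hp := (PySem.Chars.startswith_iff _ _).mp hb
          rw [String.toList_append, heq] at hp
          obtain ⟨u, hu⟩ := hp
          -- '=' occurs at position k.toList.length
          have hdropk : part.toList.drop k.toList.length = '=' :: u := by
            rw [← hu, List.append_assoc, List.drop_left]; rfl
          have h1 : n ≤ k.toList.length := by
            by_contra h
            exact hmin k.toList.length (by omega) ⟨u, by rw [hdropk]; simp⟩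
          have hkpre : k.toList <+: part.toList := ⟨'=' :: u, by simpa using hu⟩
          have h2 : ¬ n < k.toList.length := by
            intro h
            have hd : List.drop n part.toList = '=' :: t := by simpa using ht.symm
            have hcn : part.toList[n]'hlen = '=' := by
              have h10 := congrArg (fun l => l[0]?) hd
              simp only [List.getElem?_drop, Nat.add_zero] at h10
              rw [List.getElem?_eq_getElem hlen] at h10
              simpa using h10
            have h10 : k.toList[n]'h = '=' := by rw [hkpre.getElem h]; exact hcn
            exact hk (h10 ▸ List.getElem_mem h)
          have hn : n = k.toList.length := by omega
          apply hkk
          have h11 : k.toList = part.toList.take n := by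
            rw [hn]; exact List.prefix_iff_eq_take.mp hkpre
          exact String.toList_inj.mp (h11.trans hkey.symm)
      rw [hsw]
      simp

-- A's two branch tests cannot both fire: the parts start with different first characters
lemma pid_not_both (part : String) (h1 : PySem.Str.startswith part "instance=" = true)
    (h2 : PySem.Str.startswith part "device=" = true) : False := by
  rw [PySem.Str.startswith_eq, PySem.Chars.startswith_iff] at h1 h2
  have hA : ("instance=" : String).toList = ['i','n','s','t','a','n','c','e','='] := by decide
  have hB : ("device=" : String).toList = ['d','e','v','i','c','e','='] := by decide
  rw [hA] at h1
  rw [hB] at h2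
  obtain ⟨t1, e1⟩ := h1
  obtain ⟨t2, e2⟩ := h2
  rw [← e1] at e2
  simp at e2

-- the slice A takes is the drop B stores
lemma pid_slice_drop (part : String) (m : ℕ) :
    PySem.Str.slice part (some (m : Int)) none = String.ofList (part.toList.drop m) := by
  rw [← String.toList_inj, PySem.Str.toList_slice, PySem.Chars.slice_eq_listSlice,
    PySem.List.slice_from _ (by positivity), String.toList_ofList, Int.toNat_natCast]

-- one loop iteration of A equals one loop iteration of B, observed at the two keys
lemma pid_astep_eq (d : PySem.Dict String String) (part : String) :
    pid_astep (d.get? "instance", d.get? "device") part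
      = ((pid_bstep d part).get? "instance", (pid_bstep d part).get? "device") := by
  have hi := pid_bstep_get d part "instance" (by decide)
  have hd := pid_bstep_get d part "device" (by decide)
  have ei : ("instance" ++ "=" : String) = "instance=" := by decide
  have ed : ("device" ++ "=" : String) = "device=" := by decide
  have li : ("instance" : String).toList.length = 8 := by decide
  have ld : ("device" : String).toList.length = 6 := by decide
  rw [ei, li] at hi
  rw [ed, ld] at hd
  unfold pid_astep
  by_cases h1 : PySem.Str.startswith part "instance=" = true
  · have h2 : PySem.Str.startswith part "device=" = false := by
      cases hb : PySem.Str.startswith part "device="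
      · rfl
      · exact absurd (pid_not_both part h1 hb) not_false
    rw [hi, hd, h1, h2, if_pos rfl]
    simp only [if_true, if_false, Bool.false_eq_true]
    have h9 := pid_slice_drop part 9
    norm_num at h9 ⊢
    rw [h9]
  · have h1' : PySem.Str.startswith part "instance=" = false := by
      cases hb : PySem.Str.startswith part "instance="
      · rfl
      · exact absurd hb h1
    rw [hi, hd, h1']
    by_cases h2 : PySem.Str.startswith part "device=" = true
    · rw [h2]
      simp only [if_true, if_false, Bool.false_eq_true]
      have h7 := pid_slice_drop part 7
      norm_num at h7 ⊢
      rw [h7]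
    · have h2' : PySem.Str.startswith part "device=" = false := by
        cases hb : PySem.Str.startswith part "device="
        · rfl
        · exact absurd hb h2
      rw [h2']
      simp

-- the folds agree, for any starting dict and A-state reading it off
lemma pid_fold_inv (parts : List String) (d : PySem.Dict String String) :
    parts.foldl pid_astep (d.get? "instance", d.get? "device")
      = ((parts.foldl pid_bstep d).get? "instance", (parts.foldl pid_bstep d).get? "device") := by
  induction parts generalizing d with
  | nil => rfl
  | cons p rest ih =>
      simp only [List.foldl_cons, pid_astep_eq]
      exact ih _

-- ===== VERDICT (by name: the statement is the Claim_ definition above) =====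
theorem parse_instance_device_spec : Claim_equal_parse_instance_device := by
  intro s _
  unfold Spec_parse_instance_device parse_instance_device parse_instance_device_alt
  have h := pid_fold_inv ((PySem.Str.split? s " ").getD []) PySem.Dict.empty
  simpa [PySem.Dict.get?_empty] using h
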